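-- pv_equiv track=rewrite | github.com/eselyavka/python | leetcode/solution_1222.py | gen_horizontal
-- ===== SOURCE A (Python) =====
-- def gen_horizontal(row, col, s, king):
--     left = False
--     right = False
--
--     for i in range(col - 1, -1, -1):
--         if (row, i) in s:
--             break
--         if [row, i] == king:
--             left = True
--             break
--
--     for i in range(col + 1, 8):
--         if (row, i) in s:
--             break
--         if [row, i] == king:
--             right = True
--             break
--
--     return any([left, right])
-- ===== SOURCE B (Python) =====
-- def gen_horizontal(row, col, s, king):
--     # Position-based gap check: locate the king relative to the queen and test
--     # the single segment between them for blockers, instead of two break loops.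
--     if len(king) != 2 or king[0] != row:
--         return False
--     kc = king[1]
--     blockers = set(s)
--     if 0 <= kc < col:
--         return all((row, i) not in blockers for i in range(kc, col))
--     if col < kc < 8:
--         return all((row, i) not in blockers for i in range(col + 1, kc + 1))
--     return False
-- ===== Notes on version B (the rewrite author's own statement) =====
-- stated objective: faster
-- what changed: Replaces A's two break-driven outward scans (left and right from the queen) with a direct position check: locate the king's column relative to the queen and test the single segment between them with one all() over a set of blockers, so membership is O(1) instead of a list scan per square.
import Mathlib
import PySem

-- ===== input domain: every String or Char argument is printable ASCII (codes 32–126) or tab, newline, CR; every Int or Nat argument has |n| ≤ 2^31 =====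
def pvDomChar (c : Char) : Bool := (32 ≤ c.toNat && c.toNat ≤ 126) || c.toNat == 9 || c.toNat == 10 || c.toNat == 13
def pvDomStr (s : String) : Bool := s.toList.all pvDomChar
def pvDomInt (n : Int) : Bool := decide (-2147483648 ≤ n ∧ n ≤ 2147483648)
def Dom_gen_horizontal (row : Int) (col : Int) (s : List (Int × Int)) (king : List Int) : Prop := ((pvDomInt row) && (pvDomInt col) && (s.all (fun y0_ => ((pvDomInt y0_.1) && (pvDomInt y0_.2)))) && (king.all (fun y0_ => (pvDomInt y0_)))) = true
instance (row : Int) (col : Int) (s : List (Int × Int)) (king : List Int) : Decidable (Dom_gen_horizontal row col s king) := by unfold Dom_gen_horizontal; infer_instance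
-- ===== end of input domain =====

-- B replaces A's two break-driven outward scans with a single position-based gap check; alternative decomposition, same result.

-- ===== PORT A =====
-- the body of both of A's for-loops: break on blocker, set the flag on the king, else continue
def scanK (row : Int) (s : List (Int × Int)) (king : List Int) : List Int → Bool
  | [] => false
  | i :: rest =>
    if (row, i) ∈ s then false
    else if king = [row, i] then true
    else scanK row s king rest

def gen_horizontal (row : Int) (col : Int) (s : List (Int × Int)) (king : List Int) : Bool :=
  let left := scanK row s king (PySem.List.pyRange (col - 1) (-1) (-1))
  let right := scanK row s king (PySem.List.pyRange (col + 1) 8 1)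
  left || right

-- ===== PORT B =====
-- all((row, i) not in blockers for i in seg)
def segClear (row : Int) (s : List (Int × Int)) (l : List Int) : Bool :=
  l.all (fun i => !(decide ((row, i) ∈ s)))

def gen_horizontal_alt (row : Int) (col : Int) (s : List (Int × Int)) (king : List Int) : Bool :=
  match king with
  | [kr, kc] =>
    if kr ≠ row then false
    else if 0 ≤ kc ∧ kc < col then segClear row s (PySem.List.pyRange kc col 1)
    else if col < kc ∧ kc < 8 then segClear row s (PySem.List.pyRange (col + 1) (kc + 1) 1)
    else false
  | _ => false

-- ===== PRECONDITION & SPEC =====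
def Spec_gen_horizontal (row : Int) (col : Int) (s : List (Int × Int)) (king : List Int) (out : Bool) : Prop := out = gen_horizontal_alt row col s king
instance (row : Int) (col : Int) (s : List (Int × Int)) (king : List Int) (out : Bool) : Decidable (Spec_gen_horizontal row col s king out) := by unfold Spec_gen_horizontal; infer_instance

-- ===== CLAIM (what is proved, stated in full; the proofs are below) =====
def Claim_equal_gen_horizontal : Prop := ∀ (row : Int) (col : Int) (s : List (Int × Int)) (king : List Int), Dom_gen_horizontal row col s king → Spec_gen_horizontal row col s king (gen_horizontal row col s king)

-- ===== LEMMAS AND PROOFS =====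

theorem segClear_iff (row : Int) (s : List (Int × Int)) (l : List Int) :
    segClear row s l = true ↔ ∀ i ∈ l, (row, i) ∉ s := by
  simp [segClear]

-- ascending loop (A's right loop): returns true iff the king sits in [a, b) and the
-- segment from a up to and including the king's column is blocker-free
theorem scanK_asc (row : Int) (s : List (Int × Int)) (king : List Int) :
    ∀ n : Nat, ∀ a b : Int, (b - a).toNat = n →
      (scanK row s king (PySem.List.pyRange a b 1) = true ↔
        ∃ kc, king = [row, kc] ∧ a ≤ kc ∧ kc < b ∧
          segClear row s (PySem.List.pyRange a (kc + 1) 1) = true) := by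
  intro n
  induction n with
  | zero =>
    intro a b h
    have hba : b ≤ a := by omega
    rw [PySem.List.pyRange_one_eq_nil hba]
    refine iff_of_false (by simp [scanK]) ?_
    rintro ⟨kc, hk, h1, h2, h3⟩
    omega
  | succ m ih =>
    intro a b h
    have hab : a < b := by omega
    rw [PySem.List.pyRange_one_cons hab]
    by_cases hs : (row, a) ∈ s
    · simp only [scanK, if_pos hs]
      refine iff_of_false (by simp) ?_
      rintro ⟨kc, hk, h1, h2, h3⟩
      rw [segClear_iff] at h3
      exact h3 a (by rw [PySem.List.mem_pyRange_one]; omega) hs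
    · by_cases hkg : king = [row, a]
      · simp only [scanK, if_neg hs, if_pos hkg]
        refine iff_of_true trivial ⟨a, hkg, le_refl a, hab, ?_⟩
        rw [segClear_iff]
        intro i hi
        rw [PySem.List.mem_pyRange_one] at hi
        have hia : i = a := by omega
        rw [hia]; exact hs
      · simp only [scanK, if_neg hs, if_neg hkg]
        rw [ih (a + 1) b (by omega)]
        constructor
        · rintro ⟨kc, hk, h1, h2, h3⟩
          refine ⟨kc, hk, by omega, h2, ?_⟩
          rw [PySem.List.pyRange_one_cons (by omega : a < kc + 1)]
          rw [segClear_iff] at h3 ⊢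
          intro i hi
          rcases List.mem_cons.mp hi with hi | hi
          · rw [hi]; exact hs
          · exact h3 i hi
        · rintro ⟨kc, hk, h1, h2, h3⟩
          have hne : kc ≠ a := fun he => hkg (by rw [hk, he])
          refine ⟨kc, hk, by omega, h2, ?_⟩
          rw [PySem.List.pyRange_one_cons (by omega : a < kc + 1)] at h3
          rw [segClear_iff] at h3 ⊢
          intro i hi
          exact h3 i (List.mem_cons_of_mem _ hi)

-- descending loop (A's left loop): returns true iff the king sits in [0, c] and the
-- segment from the king's column up to and including c is blocker-free
theorem scanK_desc (row : Int) (s : List (Int × Int)) (king : List Int) :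
    ∀ n : Nat, ∀ c : Int, (c + 1).toNat = n →
      (scanK row s king (PySem.List.pyRange c (-1) (-1)) = true ↔
        ∃ kc, king = [row, kc] ∧ 0 ≤ kc ∧ kc ≤ c ∧
          segClear row s (PySem.List.pyRange kc (c + 1) 1) = true) := by
  intro n
  induction n with
  | zero =>
    intro c h
    have hc : c ≤ -1 := by omega
    rw [PySem.List.pyRange_neg_one_eq_nil hc]
    refine iff_of_false (by simp [scanK]) ?_
    rintro ⟨kc, hk, h1, h2, h3⟩
    omega
  | succ m ih =>
    intro c h
    have hc : (-1 : Int) < c := by omega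
    rw [PySem.List.pyRange_neg_one_cons hc]
    by_cases hs : (row, c) ∈ s
    · simp only [scanK, if_pos hs]
      refine iff_of_false (by simp) ?_
      rintro ⟨kc, hk, h1, h2, h3⟩
      rw [segClear_iff] at h3
      exact h3 c (by rw [PySem.List.mem_pyRange_one]; omega) hs
    · by_cases hkg : king = [row, c]
      · simp only [scanK, if_neg hs, if_pos hkg]
        refine iff_of_true trivial ⟨c, hkg, by omega, le_refl c, ?_⟩
        rw [segClear_iff]
        intro i hi
        rw [PySem.List.mem_pyRange_one] at hi
        have hic : i = c := by omega
        rw [hic]; exact hs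
      · simp only [scanK, if_neg hs, if_neg hkg]
        rw [ih (c - 1) (by omega)]
        simp only [show c - 1 + 1 = c from by ring]
        constructor
        · rintro ⟨kc, hk, h1, h2, h3⟩
          refine ⟨kc, hk, h1, by omega, ?_⟩
          rw [PySem.List.pyRange_one_succ_right (by omega : kc ≤ c)]
          rw [segClear_iff] at h3 ⊢
          intro i hi
          rcases List.mem_append.mp hi with hi | hi
          · exact h3 i hi
          · rw [List.mem_singleton.mp hi]; exact hs
        · rintro ⟨kc, hk, h1, h2, h3⟩
          have hne : kc ≠ c := fun he => hkg (by rw [hk, he])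
          refine ⟨kc, hk, h1, by omega, ?_⟩
          rw [PySem.List.pyRange_one_succ_right (by omega : kc ≤ c)] at h3
          rw [segClear_iff] at h3 ⊢
          intro i hi
          exact h3 i (List.mem_append_left _ hi)

-- a loop returns false when no witness of its characterisation exists
theorem scanK_asc_false (row : Int) (s : List (Int × Int)) (king : List Int) (a b : Int)
    (h : ¬ ∃ kc, king = [row, kc] ∧ a ≤ kc ∧ kc < b ∧
      segClear row s (PySem.List.pyRange a (kc + 1) 1) = true) :
    scanK row s king (PySem.List.pyRange a b 1) = false := by
  rcases Bool.eq_false_or_eq_true (scanK row s king (PySem.List.pyRange a b 1)) with hb | hb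
  · exact absurd ((scanK_asc row s king (b - a).toNat a b rfl).mp hb) h
  · exact hb

theorem scanK_desc_false (row : Int) (s : List (Int × Int)) (king : List Int) (c : Int)
    (h : ¬ ∃ kc, king = [row, kc] ∧ 0 ≤ kc ∧ kc ≤ c ∧
      segClear row s (PySem.List.pyRange kc (c + 1) 1) = true) :
    scanK row s king (PySem.List.pyRange c (-1) (-1)) = false := by
  rcases Bool.eq_false_or_eq_true (scanK row s king (PySem.List.pyRange c (-1) (-1))) with hb | hb
  · exact absurd ((scanK_desc row s king (c + 1).toNat c rfl).mp hb) h
  · exact hb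

-- ===== VERDICT (by name: the statement is the Claim_ definition above) =====
theorem gen_horizontal_spec : Claim_equal_gen_horizontal := by
  unfold Claim_equal_gen_horizontal
  intro row col s king _
  unfold Spec_gen_horizontal gen_horizontal
  match king with
  | [] =>
    rw [scanK_desc_false row s [] (col - 1) (by rintro ⟨kc, hk, _⟩; cases hk),
        scanK_asc_false row s [] (col + 1) 8 (by rintro ⟨kc, hk, _⟩; cases hk)]
    simp [gen_horizontal_alt]
  | [x] =>
    rw [scanK_desc_false row s [x] (col - 1) (by rintro ⟨kc, hk, _⟩; cases hk),
        scanK_asc_false row s [x] (col + 1) 8 (by rintro ⟨kc, hk, _⟩; cases hk)]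
    simp [gen_horizontal_alt]
  | x :: y :: z :: t =>
    rw [scanK_desc_false row s (x :: y :: z :: t) (col - 1) (by rintro ⟨kc, hk, _⟩; cases hk),
        scanK_asc_false row s (x :: y :: z :: t) (col + 1) 8 (by rintro ⟨kc, hk, _⟩; cases hk)]
    simp [gen_horizontal_alt]
  | [kr, kc] =>
    by_cases hkr : kr = row
    · by_cases hleft : 0 ≤ kc ∧ kc < col
      · have l2 : scanK row s [kr, kc] (PySem.List.pyRange (col + 1) 8 1) = false := by
          apply scanK_asc_false
          rintro ⟨kc', hk, h1, h2, _⟩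
          injection hk with hk1 hk2; injection hk2 with hk2 _
          omega
        rw [l2, Bool.or_false]
        simp only [gen_horizontal_alt, if_neg (by simp [hkr] : ¬ kr ≠ row), if_pos hleft]
        rw [Bool.eq_iff_iff,
            scanK_desc row s [kr, kc] (col - 1 + 1).toNat (col - 1) rfl,
            show col - 1 + 1 = col from by ring]
        constructor
        · rintro ⟨kc', hk, _, _, h3⟩
          injection hk with hk1 hk2; injection hk2 with hk2 _
          rw [hk2]; exact h3
        · intro h3
          exact ⟨kc, by rw [hkr], hleft.1, by omega, h3⟩
      · have l1 : scanK row s [kr, kc] (PySem.List.pyRange (col - 1) (-1) (-1)) = false := by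
          apply scanK_desc_false
          rintro ⟨kc', hk, h1, h2, _⟩
          injection hk with hk1 hk2; injection hk2 with hk2 _
          omega
        rw [l1, Bool.false_or]
        by_cases hright : col < kc ∧ kc < 8
        · simp only [gen_horizontal_alt, if_neg (by simp [hkr] : ¬ kr ≠ row), if_neg hleft,
            if_pos hright]
          rw [Bool.eq_iff_iff, scanK_asc row s [kr, kc] (8 - (col + 1)).toNat (col + 1) 8 rfl]
          constructor
          · rintro ⟨kc', hk, _, _, h3⟩
            injection hk with hk1 hk2; injection hk2 with hk2 _
            rw [hk2]; exact h3
          · intro h3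
            exact ⟨kc, by rw [hkr], by omega, hright.2, h3⟩
        · simp only [gen_horizontal_alt, if_neg (by simp [hkr] : ¬ kr ≠ row), if_neg hleft,
            if_neg hright]
          apply scanK_asc_false
          rintro ⟨kc', hk, h1, h2, _⟩
          injection hk with hk1 hk2; injection hk2 with hk2 _
          omega
    · have l1 : scanK row s [kr, kc] (PySem.List.pyRange (col - 1) (-1) (-1)) = false := by
        apply scanK_desc_false
        rintro ⟨kc', hk, _⟩
        injection hk with hk1 _; exact hkr hk1
      have l2 : scanK row s [kr, kc] (PySem.List.pyRange (col + 1) 8 1) = false := by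
        apply scanK_asc_false
        rintro ⟨kc', hk, _⟩
        injection hk with hk1 _; exact hkr hk1
      rw [l1, l2]
      simp [gen_horizontal_alt, hkr]
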